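-- pv_equiv track=rewrite | github.com/SLTNKCGZ/RAG_Project | iteration1_py/src/reranker/simple_reranker.py | __any_terms_within_window
-- ===== SOURCE A (Python) =====
-- from typing import List
--
-- def __any_terms_within_window(text: str, terms: List[str], window: int) -> bool:
--     positions: List[int] = []
--
--     for term in terms:
--         if not term:
--             continue
--
--         t = term.lower()
--         idx = text.find(t)
--
--         while idx != -1:
--             positions.append(idx)
--             idx = text.find(t, idx + 1)
--     if len(positions) < 2:
--         return False
--
--     positions.sort()
--
--     for i in range(1, len(positions)):
--         if positions[i] - positions[i - 1] <= window:
--             return True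
--
--     return False
-- ===== SOURCE B (Python) =====
-- from typing import List
--
--
-- def _iter_occurrences(text: str, t: str):
--     """Yield the start index of every occurrence of t in text, left to right."""
--     idx = text.find(t)
--     while idx != -1:
--         yield idx
--         idx = text.find(t, idx + 1)
--
--
-- def __any_terms_within_window(text: str, terms: List[str], window: int) -> bool:
--     positions = [p for term in terms if term
--                  for p in _iter_occurrences(text, term.lower())]
--     for k, p in enumerate(positions):
--         for q in positions[k + 1:]:
--             if abs(p - q) <= window:
--                 return True
--     return False
-- ===== Notes on version B (the rewrite author's own statement) =====
-- stated objective: alternative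
-- what changed: B keeps the per-term find loop that collects occurrence positions (as a flat comprehension instead of A's foldl-append) but replaces A's length guard plus sort plus adjacent-gap scan by a direct early-exit pairwise check |p-q| <= window over the collected positions.
import Mathlib
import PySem

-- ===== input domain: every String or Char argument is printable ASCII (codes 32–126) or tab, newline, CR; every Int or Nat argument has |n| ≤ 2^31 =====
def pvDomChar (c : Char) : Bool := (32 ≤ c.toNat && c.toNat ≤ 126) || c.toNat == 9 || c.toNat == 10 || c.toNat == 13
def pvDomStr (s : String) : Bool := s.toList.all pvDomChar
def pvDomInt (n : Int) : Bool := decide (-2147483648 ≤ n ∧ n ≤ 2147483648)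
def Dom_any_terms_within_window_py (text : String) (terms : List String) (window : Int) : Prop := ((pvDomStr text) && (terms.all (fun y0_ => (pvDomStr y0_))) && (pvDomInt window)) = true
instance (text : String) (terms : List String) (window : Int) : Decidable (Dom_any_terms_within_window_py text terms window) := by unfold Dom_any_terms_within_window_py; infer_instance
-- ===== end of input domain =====

-- B replaces A's sort-then-adjacent-gap scan by a direct pairwise check over the collected
-- occurrence positions (objective: alternative decomposition, no sort; same occurrence collection).

-- ===== PORT A =====
-- the 'idx = text.find(t); while idx != -1: …; idx = text.find(t, idx + 1)' loop, shared by both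
-- Pythons; fuel s.toList.length + 3 strictly exceeds the number of iterations (found indices
-- strictly increase and are ≤ len(s)).
def pvFindLoop (s t : String) : Nat → Int → List Int
  | 0, _ => []
  | fuel + 1, idx =>
    if idx = -1 then []
    else idx :: pvFindLoop s t fuel (PySem.Str.findFrom s t (idx + 1))

def pvFindAll (s t : String) : List Int :=
  pvFindLoop s t (s.toList.length + 3) (PySem.Str.find s t)

def any_terms_within_window_py (text : String) (terms : List String) (window : Int) : Bool :=
  let positions : List Int := terms.foldl (fun acc term =>
    if term = "" then acc
    else acc ++ pvFindAll text (PySem.Str.lower term)) []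
  if positions.length < 2 then false
  else
    let ps := PySem.List.sorted positions (fun x => x) false
    (PySem.List.pyRange 1 (PySem.List.len ps) 1).any (fun i =>
      decide (PySem.List.pyGetD ps i 0 - PySem.List.pyGetD ps (i - 1) 0 ≤ window))

-- ===== PORT B =====
-- 'for k, p in enumerate(positions): for q in positions[k+1:]: …' — structural recursion over
-- the suffixes of positions, exactly the iteration Source B performs.
def pvPairCheck (window : Int) : List Int → Bool
  | [] => false
  | p :: rest => rest.any (fun q => decide (|p - q| ≤ window)) || pvPairCheck window rest

def any_terms_within_window_py_alt (text : String) (terms : List String) (window : Int) : Bool :=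
  let positions : List Int :=
    (terms.filter (fun term => term ≠ "")).flatMap (fun term => pvFindAll text (PySem.Str.lower term))
  pvPairCheck window positions

-- ===== PRECONDITION & SPEC =====
def Spec_any_terms_within_window_py (text : String) (terms : List String) (window : Int) (out : Bool) : Prop := out = any_terms_within_window_py_alt text terms window
instance (text : String) (terms : List String) (window : Int) (out : Bool) : Decidable (Spec_any_terms_within_window_py text terms window out) := by unfold Spec_any_terms_within_window_py; infer_instance

-- ===== CLAIM (what is proved, stated in full; the proofs are below) =====
def Claim_equal_any_terms_within_window_py : Prop := ∀ (text : String) (terms : List String) (window : Int), Dom_any_terms_within_window_py text terms window → Spec_any_terms_within_window_py text terms window (any_terms_within_window_py text terms window)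

-- ===== LEMMAS AND PROOFS =====

-- both ports collect the same position list
lemma pv_positions_eq (text : String) (terms : List String) (acc : List Int) :
    terms.foldl (fun acc term =>
      if term = "" then acc
      else acc ++ pvFindAll text (PySem.Str.lower term)) acc =
    acc ++ (terms.filter (fun term => term ≠ "")).flatMap
      (fun term => pvFindAll text (PySem.Str.lower term)) := by
  induction terms generalizing acc with
  | nil => simp
  | cons t ts ih =>
    by_cases h : t = "" <;> simp [h, ih, List.append_assoc]

-- "the list contains two entries at distance ≤ w" — the common characterisation
def pvClose (w : Int) (xs : List Int) : Prop := ∃ a b, List.Subperm [a, b] xs ∧ |a - b| ≤ w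

lemma pv_perm_pair {l : List Int} {a b : Int} (h : l.Perm [a, b]) :
    ∃ x y, l = [x, y] ∧ |x - y| = |a - b| := by
  have hlen : l.length = 2 := by simpa using h.length_eq
  match l, hlen with
  | [x, y], _ =>
    refine ⟨x, y, rfl, ?_⟩
    have hx : x ∈ [a, b] := h.mem_iff.mp (by simp)
    rcases by simpa using hx with rfl | rfl
    · have : [y].Perm [b] := h.cons_inv
      have : y = b := by simpa using this.mem_iff.mp (by simp)
      subst this; rfl
    · have h2 : (x :: [y]).Perm (x :: [a]) := h.trans (List.Perm.swap x a [])
      have : y = a := by simpa using h2.cons_inv.mem_iff.mp (by simp)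
      subst this
      rw [abs_sub_comm]
lemma pv_pair_sublist_check {w : Int} {x y : Int} :
    ∀ {xs : List Int}, List.Sublist [x, y] xs → |x - y| ≤ w → pvPairCheck w xs = true := by
  intro xs
  induction xs with
  | nil => intro h; exact absurd (List.Sublist.length_le h) (by simp)
  | cons z zs ih =>
    intro h hle
    cases h with
    | cons _ h' =>
      simp [pvPairCheck, ih h' hle]
    | cons₂ _ h' =>
      have hy : y ∈ zs := List.singleton_sublist.mp h'
      simp [pvPairCheck]
      exact Or.inl ⟨y, hy, hle⟩

lemma pvPairCheck_iff (w : Int) (xs : List Int) : pvPairCheck w xs = true ↔ pvClose w xs := by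
  constructor
  · induction xs with
    | nil => simp [pvPairCheck]
    | cons p rest ih =>
      intro h
      rcases Bool.or_eq_true_iff.mp h with h1 | h2
      · obtain ⟨q, hq, hle⟩ := by simpa using h1
        exact ⟨p, q, (List.cons_sublist_cons.mpr (List.singleton_sublist.mpr hq)).subperm, hle⟩
      · obtain ⟨a, b, hsub, hle⟩ := ih h2
        exact ⟨a, b, hsub.trans (List.sublist_cons_self p rest).subperm, hle⟩
  · rintro ⟨a, b, ⟨l, hperm, hsl⟩, hle⟩
    obtain ⟨x, y, rfl, habs⟩ := pv_perm_pair hperm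
    exact pv_pair_sublist_check hsl (by rw [habs]; exact hle)

lemma pv_pair_getElem_sublist (l : List Int) (p q : Nat) (hpq : p < q) (hq : q < l.length) :
    List.Sublist [l[p], l[q]] l := by
  have hp : p < l.length := lt_trans hpq hq
  have h1 : l[q] ∈ l.drop (p + 1) := by
    have : (l.drop (p + 1))[q - (p + 1)]'(by simp; omega) = l[q] := by
      rw [List.getElem_drop]; congr 1; omega
    exact this ▸ List.getElem_mem _
  have h2 : List.Sublist [l[p], l[q]] (l[p] :: l.drop (p + 1)) :=
    List.cons_sublist_cons.mpr (List.singleton_sublist.mpr h1)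
  have h3 : l[p] :: l.drop (p + 1) = l.drop p := (List.drop_eq_getElem_cons hp).symm
  exact h3 ▸ h2 |>.trans (List.drop_sublist p l)

lemma pv_sublist_pair_indices {x y : Int} :
    ∀ {l : List Int}, List.Sublist [x, y] l →
      ∃ p q, p < q ∧ q < l.length ∧ l[p]? = some x ∧ l[q]? = some y := by
  intro l
  induction l with
  | nil => intro h; exact absurd (List.Sublist.length_le h) (by simp)
  | cons z zs ih =>
    intro h
    cases h with
    | cons _ h' =>
      obtain ⟨p, q, h1, h2, h3, h4⟩ := ih h'
      exact ⟨p + 1, q + 1, by omega, by simp; omega, by simpa using h3, by simpa using h4⟩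
    | cons₂ _ h' =>
      have hy : y ∈ zs := List.singleton_sublist.mp h'
      obtain ⟨j, hj, hgy⟩ := List.getElem_of_mem hy
      exact ⟨0, j + 1, by omega, by simp; omega, by simp, by simp [hj, hgy]⟩

lemma pvACheck_iff (w : Int) (xs : List Int) :
    ((if xs.length < 2 then false
     else
       (PySem.List.pyRange 1 (PySem.List.len (PySem.List.sorted xs (fun x => x) false)) 1).any (fun i =>
         decide (PySem.List.pyGetD (PySem.List.sorted xs (fun x => x) false) i 0 -
           PySem.List.pyGetD (PySem.List.sorted xs (fun x => x) false) (i - 1) 0 ≤ w))) = true)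
    ↔ pvClose w xs := by
  have hperm : (PySem.List.sorted xs (fun x => x) false).Perm xs :=
    PySem.List.sorted_perm xs (fun x => x) false
  have hlen : (PySem.List.sorted xs (fun x => x) false).length = xs.length := hperm.length_eq
  by_cases hsmall : xs.length < 2
  · simp only [if_pos hsmall]
    constructor
    · intro h; exact absurd h (by simp)
    · rintro ⟨a, b, hsub, -⟩
      have := hsub.length_le
      simp at this; omega
  · simp only [if_neg hsmall]
    rw [List.any_eq_true]
    constructor
    · rintro ⟨i, hi, hdec⟩
      rw [PySem.List.mem_pyRange_one] at hi
      rw [PySem.List.len_eq] at hi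
      obtain ⟨hi1, hi2⟩ := hi
      have hk2 : i.toNat < (PySem.List.sorted xs (fun x => x) false).length := by omega
      rw [PySem.List.pyGetD_eq_getElem _ 0 (by omega) (by omega),
          PySem.List.pyGetD_eq_getElem _ 0 (by omega) (by omega)] at hdec
      have hle : _ ≤ w := of_decide_eq_true hdec
      have hmono : (PySem.List.sorted xs (fun x => x) false)[(i-1).toNat]'(by omega) ≤
          (PySem.List.sorted xs (fun x => x) false)[i.toNat] :=
        PySem.List.sorted_id_getElem_mono xs (by omega) hk2
      refine ⟨(PySem.List.sorted xs (fun x => x) false)[(i-1).toNat]'(by omega),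
              (PySem.List.sorted xs (fun x => x) false)[i.toNat], ?_, ?_⟩
      · exact ((pv_pair_getElem_sublist _ (i-1).toNat i.toNat (by omega) hk2).subperm).trans
          hperm.subperm
      · rw [abs_sub_comm, abs_of_nonneg (by omega)]; omega
    · rintro ⟨a, b, hsub, hle⟩
      have hsub' : List.Subperm [a, b] (PySem.List.sorted xs (fun x => x) false) :=
        hsub.trans hperm.symm.subperm
      obtain ⟨l, hpm, hsl⟩ := hsub'
      obtain ⟨x, y, rfl, habs⟩ := pv_perm_pair hpm
      obtain ⟨p, q, hpq, hqn, hpx, hqy⟩ := pv_sublist_pair_indices hsl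
      have hpn : p < (PySem.List.sorted xs (fun x => x) false).length := lt_trans hpq hqn
      have hx : (PySem.List.sorted xs (fun x => x) false)[p] = x := by
        simpa [List.getElem?_eq_getElem hpn] using hpx
      have hy : (PySem.List.sorted xs (fun x => x) false)[q] = y := by
        simpa [List.getElem?_eq_getElem hqn] using hqy
      have hmono1 : (PySem.List.sorted xs (fun x => x) false)[p] ≤
          (PySem.List.sorted xs (fun x => x) false)[q] :=
        PySem.List.sorted_id_getElem_mono xs (by omega) hqn
      have hxy : y - x ≤ w := by
        rw [← habs, abs_sub_comm, abs_of_nonneg (by omega)] at hle; omega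
      have hp1 : p + 1 < (PySem.List.sorted xs (fun x => x) false).length := by omega
      have hmono2 : (PySem.List.sorted xs (fun x => x) false)[p+1] ≤
          (PySem.List.sorted xs (fun x => x) false)[q] :=
        PySem.List.sorted_id_getElem_mono xs (by omega) hqn
      refine ⟨((p : Int) + 1), ?_, ?_⟩
      · rw [PySem.List.mem_pyRange_one, PySem.List.len_eq]
        exact ⟨by omega, by omega⟩
      · rw [PySem.List.pyGetD_eq_getElem _ 0 (by omega) (by omega),
            PySem.List.pyGetD_eq_getElem _ 0 (by omega) (by omega)]
        refine decide_eq_true ?_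
        have e1 : ((p : Int) + 1).toNat = p + 1 := by omega
        have e2 : ((p : Int) + 1 - 1).toNat = p := by omega
        simp only [e1, e2]
        omega

-- ===== VERDICT (by name: the statement is the Claim_ definition above) =====
theorem any_terms_within_window_py_spec : Claim_equal_any_terms_within_window_py := by
  intro text terms window _
  unfold Spec_any_terms_within_window_py
  unfold any_terms_within_window_py any_terms_within_window_py_alt
  rw [pv_positions_eq]
  simp only [List.nil_append]
  exact Bool.eq_iff_iff.mpr ((pvACheck_iff window _).trans (pvPairCheck_iff window _).symm)
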